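-- pv_equiv track=rewrite | github.com/mashaelalzaid/microcontroller_TeamBlack | C_src/convert_hex.py | convert_to_little_endian
-- ===== SOURCE A (Python) =====
-- def convert_to_little_endian(hex_string):
--     """Converts a hex string to little-endian format."""
--     hex_string = hex_string.replace(" ", "").upper()  # Remove spaces and ensure uppercase
--
--     # Process 4 bytes (8 hex characters) at a time
--     results = []
--     for i in range(0, len(hex_string), 8):
--         word = hex_string[i:i+8]
--         if len(word) == 8:
--             # Convert to little-endian format (reverse byte order)
--             little_endian_word = "0x" + word[6:8] + word[4:6] + word[2:4] + word[0:2]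
--             results.append(little_endian_word)
--
--     return results
-- ===== SOURCE B (Python) =====
-- def convert_to_little_endian(hex_string):
--     """Converts a hex string to little-endian format."""
--     s = hex_string.replace(" ", "").upper()
--     # Group the characters 8 at a time with the zip-of-iterators idiom
--     # (incomplete trailing groups are dropped by zip), then swap the
--     # byte pairs of each group into little-endian order.
--     it = [iter(s)] * 8
--     return ["0x" + g + h + e + f + c + d + a + b
--             for a, b, c, d, e, f, g, h in zip(*it)]
-- ===== Notes on version B (the rewrite author's own statement) =====
-- stated objective: idiomatic
-- what changed: Replaces A's index loop with 8-wide string slices and a length==8 guard by the zip-of-iterators grouping idiom: the cleaned string is consumed eight characters at a time (zip drops any incomplete trailing group) and each group's characters are reassembled directly in little-endian byte order.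
import Mathlib
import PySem

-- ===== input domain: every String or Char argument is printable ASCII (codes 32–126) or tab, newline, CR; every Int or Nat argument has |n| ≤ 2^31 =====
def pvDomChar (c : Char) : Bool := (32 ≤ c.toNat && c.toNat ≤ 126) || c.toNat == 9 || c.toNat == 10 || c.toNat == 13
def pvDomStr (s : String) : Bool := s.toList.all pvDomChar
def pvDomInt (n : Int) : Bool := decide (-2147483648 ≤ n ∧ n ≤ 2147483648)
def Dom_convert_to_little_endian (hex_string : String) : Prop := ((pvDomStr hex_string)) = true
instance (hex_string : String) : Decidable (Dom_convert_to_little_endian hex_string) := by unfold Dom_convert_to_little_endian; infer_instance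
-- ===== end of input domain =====

-- B regroups the cleaned string with a zip-of-iterators 8-way grouping (one word per complete
-- 8-char group) instead of A's index loop over string slices; objective: idiomatic.
set_option maxHeartbeats 1000000


-- ===== PORT A =====
def convert_to_little_endian (hex_string : String) : List String :=
  let s := PySem.Str.upper (PySem.Str.replace hex_string " " "")
  (PySem.List.pyRange 0 (PySem.Str.len s) 8).foldl (fun results i =>
    let word := PySem.Str.slice s (some i) (some (i + 8))
    if PySem.Str.len word == 8 then
      -- "0x" + word[6:8] + word[4:6] + word[2:4] + word[0:2] (string concatenation)
      results ++ [PySem.Str.join "" ["0x",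
        PySem.Str.slice word (some 6) (some 8),
        PySem.Str.slice word (some 4) (some 6),
        PySem.Str.slice word (some 2) (some 4),
        PySem.Str.slice word (some 0) (some 2)]]
    else results) []

-- ===== PORT B =====
-- the zip(*[iter(s)]*8) grouping: consume eight characters per step, any incomplete trailing
-- group is dropped; "0x" + g + h + e + f + c + d + a + b concatenates single characters,
-- which is exactly String.ofList.
def pvGroupWords : List Char → List String
  | a :: b :: c :: d :: e :: f :: g :: h :: rest =>
      String.ofList ('0' :: 'x' :: g :: h :: e :: f :: c :: d :: a :: b :: []) :: pvGroupWords rest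
  | _ => []

def convert_to_little_endian_alt (hex_string : String) : List String :=
  pvGroupWords (PySem.Str.upper (PySem.Str.replace hex_string " " "")).toList

-- ===== PRECONDITION & SPEC =====
def Spec_convert_to_little_endian (hex_string : String) (out : List String) : Prop := out = convert_to_little_endian_alt hex_string
instance (hex_string : String) (out : List String) : Decidable (Spec_convert_to_little_endian hex_string out) := by unfold Spec_convert_to_little_endian; infer_instance

-- ===== CLAIM (what is proved, stated in full; the proofs are below) =====
def Claim_equal_convert_to_little_endian : Prop := ∀ (hex_string : String), Dom_convert_to_little_endian hex_string → Spec_convert_to_little_endian hex_string (convert_to_little_endian hex_string)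

-- ===== LEMMAS AND PROOFS =====

-- the slice s[8k : 8k+8] is take 8 ∘ drop 8k on the character list
theorem pv_slice_word (L : List Char) (k : Nat) :
    PySem.List.slice L (some (8*(k:Int))) (some (8*(k:Int) + 8)) = (L.drop (8*k)).take 8 := by
  have h8 : (8*(k:Int)) = ((8*k : Nat) : Int) := by push_cast; ring
  have h8' : (8*(k:Int) + 8) = ((8*k : Nat) : Int) + ((8:Nat) : Int) := by push_cast; ring
  rw [h8', h8]; exact PySem.List.slice_natCast_add _ _ _

-- one loop iteration of A builds exactly the word String.ofList gives on the list side
theorem pv_word_eq (s : String) (k : Nat) :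
    PySem.Str.join "" ["0x",
        PySem.Str.slice (PySem.Str.slice s (some (8*(k:Int))) (some (8*(k:Int) + 8))) (some 6) (some 8),
        PySem.Str.slice (PySem.Str.slice s (some (8*(k:Int))) (some (8*(k:Int) + 8))) (some 4) (some 6),
        PySem.Str.slice (PySem.Str.slice s (some (8*(k:Int))) (some (8*(k:Int) + 8))) (some 2) (some 4),
        PySem.Str.slice (PySem.Str.slice s (some (8*(k:Int))) (some (8*(k:Int) + 8))) (some 0) (some 2)]
    = String.ofList (
        let w := (s.toList.drop (8*k)).take 8
        '0' :: 'x' :: ((w.drop 6).take 2 ++ ((w.drop 4).take 2 ++ ((w.drop 2).take 2 ++ w.take 2)))) := by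
  apply String.toList_inj.mp
  have e68 : ∀ (w : List Char), PySem.List.slice w (some 6) (some 8) = (w.drop 6).take 2 := fun w => by
    have := PySem.List.slice_natCast w 6 8; norm_num at this; exact this
  have e46 : ∀ (w : List Char), PySem.List.slice w (some 4) (some 6) = (w.drop 4).take 2 := fun w => by
    have := PySem.List.slice_natCast w 4 6; norm_num at this; exact this
  have e24 : ∀ (w : List Char), PySem.List.slice w (some 2) (some 4) = (w.drop 2).take 2 := fun w => by
    have := PySem.List.slice_natCast w 2 4; norm_num at this; exact this
  have e02 : ∀ (w : List Char), PySem.List.slice w none (some 2) = w.take 2 := fun w => by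
    have := PySem.List.slice_to_natCast w 2; norm_num at this; exact this
  simp only [PySem.Str.toList_join, String.toList_ofList]
  simp [PySem.Chars.join, List.intercalate, PySem.Chars.slice, pv_slice_word, e68, e46, e24, e02]

theorem pv_filter_decide_lt_range (c m : Nat) (hm : m ≤ c) :
    (List.range c).filter (fun k => decide (k < m)) = List.range m := by
  obtain ⟨d, rfl⟩ := Nat.exists_eq_add_of_le hm
  rw [List.range_add, List.filter_append]
  have h1 : (List.range m).filter (fun k => decide (k < m)) = List.range m :=
    List.filter_eq_self.mpr (by intro a ha; simpa using List.mem_range.mp ha)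
  have h2 : ((List.range d).map (fun x => m + x)).filter (fun k => decide (k < m)) = [] := by
    rw [List.filter_eq_nil_iff]
    intro a ha
    simp only [List.mem_map] at ha
    obtain ⟨x, _, rfl⟩ := ha
    simp
  rw [h1, h2, List.append_nil]

-- the word built from group k of L, as B builds it
theorem pv_map_range_eq (L : List Char) :
    (List.range (L.length / 8)).map (fun k => String.ofList (
        let w := (L.drop (8*k)).take 8
        '0' :: 'x' :: ((w.drop 6).take 2 ++ ((w.drop 4).take 2 ++ ((w.drop 2).take 2 ++ w.take 2)))))
      = pvGroupWords L := by
  induction L using pvGroupWords.induct with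
  | case1 a b c d e f g h rest ih =>
    have hlen : (a::b::c::d::e::f::g::h::rest).length / 8 = rest.length / 8 + 1 := by
      simp [List.length_cons]; omega
    rw [hlen, List.range_succ_eq_map, List.map_cons, List.map_map, pvGroupWords]
    refine congrArg₂ _ ?_ ?_
    · simp
    · rw [← ih]
      refine List.map_congr_left ?_
      intro k _
      have hdrop : (a::b::c::d::e::f::g::h::rest).drop (8 * Nat.succ k) = rest.drop (8*k) := by
        have h1 : 8 * Nat.succ k = 8*k + 8 := by omega
        rw [h1, ← List.drop_drop]
        simp [List.drop]
      simp only [Function.comp_apply, hdrop]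
  | case2 t hnot =>
    rcases t with _|⟨a, _|⟨b, _|⟨c, _|⟨d, _|⟨e, _|⟨f, _|⟨g, _|⟨h, rest⟩⟩⟩⟩⟩⟩⟩⟩
    all_goals first
      | exact (hnot _ _ _ _ _ _ _ _ _ rfl).elim
      | simp [pvGroupWords]

-- A's guard len(word) == 8 holds exactly for the complete groups k < len/8
theorem pv_guard_eq (s : String) (k : Nat) :
    (PySem.Str.len (PySem.Str.slice s (some (8*(k:Int))) (some (8*(k:Int) + 8))) == 8)
      = decide (k < s.toList.length / 8) := by
  rw [PySem.Str.len_eq, PySem.Str.toList_slice]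
  have e1 : PySem.Chars.slice s.toList (some (8*(k:Int))) (some (8*(k:Int) + 8))
      = (s.toList.drop (8*k)).take 8 := pv_slice_word _ _
  rw [e1]
  have hlen2 : ((s.toList.drop (8*k)).take 8).length = min 8 (s.toList.length - 8*k) := by
    rw [List.length_take, List.length_drop]
  rw [hlen2]
  by_cases hk : k < s.toList.length / 8
  · have hmin : min 8 (s.toList.length - 8*k) = 8 := by omega
    rw [hmin]
    have h8 : (((8:Nat):Int) == (8:Int)) = true := by decide
    rw [h8]
    exact (decide_eq_true hk).symm
  · simp only [hk, decide_false]
    rw [beq_eq_false_iff_ne]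
    intro hcontr
    have : min 8 (s.toList.length - 8*k) = 8 := by exact_mod_cast hcontr
    omega

theorem convert_to_little_endian_eq (s : String) :
    (PySem.List.pyRange 0 (PySem.Str.len s) 8).foldl (fun results i =>
      let word := PySem.Str.slice s (some i) (some (i + 8))
      if PySem.Str.len word == 8 then
        results ++ [PySem.Str.join "" ["0x",
          PySem.Str.slice word (some 6) (some 8),
          PySem.Str.slice word (some 4) (some 6),
          PySem.Str.slice word (some 2) (some 4),
          PySem.Str.slice word (some 0) (some 2)]]
      else results) [] = pvGroupWords s.toList := by
  rw [PySem.Str.len_eq, PySem.List.pyRange_of_pos 0 _ (by norm_num : (0:Int) < 8), List.foldl_map]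
  simp only [zero_add]
  rw [PySem.List.foldl_append_if, List.nil_append]
  have hc : (if (0:Int) < (s.toList.length:Int)
        then (((s.toList.length:Int) - 0 + 8 - 1) / 8).toNat else 0) = (s.toList.length + 7)/8 := by
    split_ifs with h
    · have h7 : ((s.toList.length:Int) - 0 + 8 - 1) = ((s.toList.length + 7 : Nat) : Int) := by
        push_cast; ring
      rw [h7]; omega
    · have hn : s.toList.length = 0 := by omega
      simp [hn]
  rw [hc]
  rw [List.filter_congr (fun k _ => pv_guard_eq s k)]
  rw [pv_filter_decide_lt_range _ _ (by omega)]
  refine Eq.trans (List.map_congr_left ?_) (pv_map_range_eq s.toList)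
  intro k _
  exact pv_word_eq s k

-- ===== VERDICT (by name: the statement is the Claim_ definition above) =====
theorem convert_to_little_endian_spec : Claim_equal_convert_to_little_endian := by
  intro hex_string _
  unfold Spec_convert_to_little_endian convert_to_little_endian convert_to_little_endian_alt
  exact convert_to_little_endian_eq _
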